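-- pv_equiv track=rewrite | github.com/Oliveira144/0001.py | 0001.py | codificar_coluna
-- ===== SOURCE A (Python) =====
-- def codificar_coluna(coluna):
--     mapa = {}
--     codigo = []
--     letra = "A"
--     for cor in coluna:
--         if cor not in mapa:
--             mapa[cor] = letra
--             letra = chr(ord(letra) + 1)
--         codigo.append(mapa[cor])
--     return "".join(codigo)
-- ===== SOURCE B (Python) =====
-- def codificar_coluna(coluna):
--     # Stateless: the letter of c is 'A' shifted by the number of distinct
--     # values appearing strictly before c's first occurrence.
--     return "".join(
--         chr(ord("A") + len(set(coluna[:coluna.index(c)]))) for c in coluna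
--     )
-- ===== Notes on version B (the rewrite author's own statement) =====
-- stated objective: alternative
-- what changed: A builds a first-seen translation dict and a next-letter counter incrementally in one stateful loop; B keeps no table or counter at all and computes each letter independently by a closed-form rank: chr(ord('A') + len(set(coluna[:coluna.index(c)]))), the number of distinct values before c's first occurrence. B trades A's O(n) single pass for an O(n^2) stateless per-element formula. Pre_ excludes only columns with more than 55231 distinct values, where Python's chr yields surrogate code points that a Lean Char/String cannot represent (A and B agree there in Python; …
import Mathlib
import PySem

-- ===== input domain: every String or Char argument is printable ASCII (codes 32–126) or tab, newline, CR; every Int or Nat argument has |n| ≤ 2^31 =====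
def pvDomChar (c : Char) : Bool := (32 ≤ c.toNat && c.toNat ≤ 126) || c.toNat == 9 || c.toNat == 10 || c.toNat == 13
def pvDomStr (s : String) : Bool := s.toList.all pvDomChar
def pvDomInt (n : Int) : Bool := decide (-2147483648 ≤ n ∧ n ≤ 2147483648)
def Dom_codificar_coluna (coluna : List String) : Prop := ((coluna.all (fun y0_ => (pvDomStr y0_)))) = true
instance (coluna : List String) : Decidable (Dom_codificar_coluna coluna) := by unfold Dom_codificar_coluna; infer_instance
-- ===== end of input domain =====

-- B keeps no table or counter: each letter is computed independently as 'A' + number of distinct values before the element's first occurrence (stateless per-element formula, O(n^2) vs A's O(n) stateful pass).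


-- ===== PORT A =====
-- Loop body of A, named: state is (mapa, codigo, letra). letra, a one-character Python str, is carried
-- as a Char; chr(ord(letra)+1) is Char.ofNat (letra.toNat+1) (exact while all codes stay below 0xD800 —
-- guaranteed by Pre_ below); mapa[cor] is always present when read, so .getD "" is exact.
def pvStep (st : PySem.Dict String String × List String × Char) (cor : String) :
    PySem.Dict String String × List String × Char :=
  if st.1.contains cor = false then
    let mapa := st.1.insert cor (String.mk [st.2.2])
    (mapa, st.2.1 ++ [(mapa.get? cor).getD ""], Char.ofNat (st.2.2.toNat + 1))
  else
    (st.1, st.2.1 ++ [(st.1.get? cor).getD ""], st.2.2)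

def codificar_coluna (coluna : List String) : String :=
  let fin := coluna.foldl pvStep (PySem.Dict.empty, [], 'A')
  PySem.Str.join "" fin.2.1

-- ===== PORT B =====
-- "".join(chr(ord('A') + len(set(coluna[:coluna.index(c)]))) for c in coluna)
-- coluna.index(c) always succeeds (c is drawn from coluna), so .getD 0 is exact.
def codificar_coluna_alt (coluna : List String) : String :=
  PySem.Str.join "" (coluna.map (fun c =>
    String.mk [Char.ofNat (65 +
      (PySem.Set.ofList (PySem.List.slice coluna none
        (some (((PySem.List.index? coluna c).getD 0 : Nat) : Int)))).length)]))

-- ===== PRECONDITION & SPEC =====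
-- Pre_ excludes columns with more than 55231 distinct values: there Python's chr hands out surrogate
-- code points (U+D800…), which are not valid Lean Chars, so A's Python output cannot be represented as a Lean String.
def Pre_codificar_coluna (coluna : List String) : Prop := (PySem.List.dedup coluna).length ≤ 55231
instance (coluna : List String) : Decidable (Pre_codificar_coluna coluna) := by unfold Pre_codificar_coluna; infer_instance
def pvWitness_codificar_coluna : List String := ["azul", "vermelho", "azul", "", "azul"]
def Spec_codificar_coluna (coluna : List String) (out : String) : Prop := out = codificar_coluna_alt coluna
instance (coluna : List String) (out : String) : Decidable (Spec_codificar_coluna coluna out) := by unfold Spec_codificar_coluna; infer_instance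

-- ===== CLAIM (what is proved, stated in full; the proofs are below) =====
def Claim_equal_codificar_coluna : Prop := ∀ (coluna : List String), Dom_codificar_coluna coluna → Pre_codificar_coluna coluna → Spec_codificar_coluna coluna (codificar_coluna coluna)

-- ===== LEMMAS AND PROOFS =====

-- the letter assigned to the n-th distinct value
def pvLetter (n : Nat) : String := String.mk [Char.ofNat (65 + n)]

-- the association list A's translation table holds, keys xs, values starting at letter n
def pvPairs : Nat → List String → List (String × String)
  | _, [] => []
  | n, c :: r => (c, pvLetter n) :: pvPairs (n + 1) r

theorem pvPairs_append (xs ys : List String) (n : Nat) :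
    pvPairs n (xs ++ ys) = pvPairs n xs ++ pvPairs (n + xs.length) ys := by
  induction xs generalizing n with
  | nil => simp [pvPairs]
  | cons x xs ih => simp [pvPairs, ih, Nat.add_assoc, Nat.add_comm 1 xs.length]

theorem pvPairs_fst (xs : List String) (n : Nat) : (pvPairs n xs).map (·.1) = xs := by
  induction xs generalizing n with
  | nil => rfl
  | cons x xs ih => simp [pvPairs, ih]

theorem pvCharRound (n : Nat) (h : n < 55296) : (Char.ofNat n).toNat = n := by
  have hv : n.isValidChar := Or.inl h
  simp [Char.ofNat, hv, Char.ofNatAux, Char.toNat]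

-- lookup skips an append whose keys do not contain c
theorem pvGet_skip_left (l1 l2 : List (String × String)) (c : String)
    (h : c ∉ l1.map (·.1)) :
    (PySem.Dict.mk (l1 ++ l2)).get? c = (PySem.Dict.mk l2).get? c := by
  induction l1 with
  | nil => rfl
  | cons p l1 ih =>
    simp only [List.map_cons, List.mem_cons, not_or] at h
    rw [List.cons_append, PySem.Dict.get?_mk_cons]
    have hp : (p.1 == c) = false := by simp [Ne.symm h.1]
    simp only [hp, Bool.false_eq_true, if_false]
    exact ih h.2

theorem pvGet_mk_append_left (l1 l2 : List (String × String)) (c : String)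
    (h : c ∈ l1.map (·.1)) :
    (PySem.Dict.mk (l1 ++ l2)).get? c = (PySem.Dict.mk l1).get? c := by
  induction l1 with
  | nil => simp at h
  | cons p l1 ih =>
    rw [List.cons_append, PySem.Dict.get?_mk_cons, PySem.Dict.get?_mk_cons]
    by_cases hp : p.1 == c
    · simp [hp]
    · simp only [hp, Bool.false_eq_true, if_false]
      apply ih
      simp only [List.map_cons, List.mem_cons] at h
      rcases h with h | h
      · exact absurd h.symm (by simpa using hp)
      · exact h

theorem pvGet_fresh (xs : List String) (c : String) (n : Nat) (h : c ∉ xs) :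
    (PySem.Dict.mk (pvPairs n (xs ++ [c]))).get? c = some (pvLetter (n + xs.length)) := by
  induction xs generalizing n with
  | nil => simp [pvPairs, PySem.Dict.get?_mk_cons]
  | cons x xs ih =>
    simp only [List.mem_cons, not_or] at h
    rw [List.cons_append]
    simp only [pvPairs, PySem.Dict.get?_mk_cons]
    have hx : (x == c) = false := by simp [Ne.symm h.1]
    simp only [hx, Bool.false_eq_true, if_false]
    rw [ih (n + 1) h.2]
    simp [List.length_cons, Nat.add_assoc, Nat.add_comm 1 xs.length]

theorem pvInsert_fresh (seen : List String) (c : String) (h : c ∉ seen) :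
    (PySem.Dict.mk (pvPairs 0 seen)).insert c (pvLetter seen.length)
      = PySem.Dict.mk (pvPairs 0 (seen ++ [c])) := by
  have hc : (PySem.Dict.mk (pvPairs 0 seen)).contains c = false := by
    have hk : c ∉ (PySem.Dict.mk (pvPairs 0 seen)).keys := by
      show c ∉ (pvPairs 0 seen).map (·.1)
      rw [pvPairs_fst]
      exact h
    rcases hb : (PySem.Dict.mk (pvPairs 0 seen)).contains c with _ | _
    · rfl
    · exact absurd ((PySem.Dict.contains_iff_mem_keys _ _).mp hb) hk
  apply PySem.Dict.ext
  rw [PySem.Dict.items_insert_of_not_contains _ _ hc]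
  show pvPairs 0 seen ++ [(c, pvLetter seen.length)] = pvPairs 0 (seen ++ [c])
  rw [pvPairs_append]
  simp [pvPairs]

-- foldl Set.add only appends
theorem pvFoldAdd_prefix (rest seen : List String) :
    ∃ t, rest.foldl PySem.Set.add seen = seen ++ t := by
  induction rest generalizing seen with
  | nil => exact ⟨[], by simp⟩
  | cons r rest ih =>
    rcases ih (PySem.Set.add seen r) with ⟨t, ht⟩
    by_cases hr : r ∈ seen
    · exact ⟨t, by simpa [PySem.Set.add_of_mem hr] using ht⟩
    · exact ⟨r :: t, by simpa [PySem.Set.add_of_not_mem hr] using ht⟩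

-- lookup of an already-seen key is unchanged when the table is extended on the right
theorem pvGet_final (seen t : List String) (r : String) (hr : r ∈ seen) :
    (PySem.Dict.mk (pvPairs 0 (seen ++ t))).get? r = (PySem.Dict.mk (pvPairs 0 seen)).get? r := by
  rw [pvPairs_append]
  exact pvGet_mk_append_left _ _ _ (by rw [pvPairs_fst]; exact hr)

theorem pvStep_mem (seen acc : List String) (r : String) (ch : Char) (hr : r ∈ seen) :
    pvStep (PySem.Dict.mk (pvPairs 0 seen), acc, ch) r
      = (PySem.Dict.mk (pvPairs 0 seen),
         acc ++ [((PySem.Dict.mk (pvPairs 0 seen)).get? r).getD ""], ch) := by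
  have hcont : (PySem.Dict.mk (pvPairs 0 seen)).contains r = true := by
    apply (PySem.Dict.contains_iff_mem_keys _ _).mpr
    show r ∈ (pvPairs 0 seen).map (·.1)
    rw [pvPairs_fst]; exact hr
  simp [pvStep, hcont]

theorem pvStep_new (seen acc : List String) (r : String) (hr : r ∉ seen)
    (hlen : 65 + seen.length < 55296) :
    pvStep (PySem.Dict.mk (pvPairs 0 seen), acc, Char.ofNat (65 + seen.length)) r
      = (PySem.Dict.mk (pvPairs 0 (seen ++ [r])),
         acc ++ [pvLetter seen.length], Char.ofNat (65 + (seen ++ [r]).length)) := by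
  have hcont : (PySem.Dict.mk (pvPairs 0 seen)).contains r = false := by
    have hk : r ∉ (PySem.Dict.mk (pvPairs 0 seen)).keys := by
      show r ∉ (pvPairs 0 seen).map (·.1)
      rw [pvPairs_fst]; exact hr
    rcases hb : (PySem.Dict.mk (pvPairs 0 seen)).contains r with _ | _
    · rfl
    · exact absurd ((PySem.Dict.contains_iff_mem_keys _ _).mp hb) hk
  have e : String.mk [Char.ofNat (65 + seen.length)] = pvLetter seen.length := rfl
  simp only [pvStep, hcont]
  rw [e, pvInsert_fresh seen r hr, pvCharRound _ hlen]
  have hget : (PySem.Dict.mk (pvPairs 0 (seen ++ [r]))).get? r = some (pvLetter (0 + seen.length)) :=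
    pvGet_fresh seen r 0 hr
  rw [hget]
  simp [Nat.add_assoc]

theorem pvInv (rest : List String) : ∀ (seen acc : List String),
    (rest.foldl PySem.Set.add seen).length ≤ 55231 →
    rest.foldl pvStep (PySem.Dict.mk (pvPairs 0 seen), acc, Char.ofNat (65 + seen.length))
    = (PySem.Dict.mk (pvPairs 0 (rest.foldl PySem.Set.add seen)),
       acc ++ rest.map (fun c =>
         ((PySem.Dict.mk (pvPairs 0 (rest.foldl PySem.Set.add seen))).get? c).getD ""),
       Char.ofNat (65 + (rest.foldl PySem.Set.add seen).length)) := by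
  induction rest with
  | nil => intro seen acc _; simp
  | cons r rest ih =>
    intro seen acc h65
    simp only [List.foldl_cons] at h65 ⊢
    by_cases hr : r ∈ seen
    · rw [PySem.Set.add_of_mem hr] at h65 ⊢
      rw [pvStep_mem seen acc r _ hr, ih seen _ h65]
      rcases pvFoldAdd_prefix rest seen with ⟨t, ht⟩
      rw [List.map_cons]
      have hv : ((PySem.Dict.mk (pvPairs 0 (rest.foldl PySem.Set.add seen))).get? r).getD ""
          = ((PySem.Dict.mk (pvPairs 0 seen)).get? r).getD "" := by
        rw [ht, pvGet_final seen t r hr]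
      rw [hv]
      simp
    · rw [PySem.Set.add_of_not_mem hr] at h65 ⊢
      rcases pvFoldAdd_prefix rest (seen ++ [r]) with ⟨t, ht⟩
      have hlen : 65 + seen.length < 55296 := by
        have : (seen ++ [r]).length ≤ (rest.foldl PySem.Set.add (seen ++ [r])).length := by
          rw [ht]; simp
        simp only [List.length_append, List.length_cons, List.length_nil] at this
        omega
      rw [pvStep_new seen acc r hr hlen, ih (seen ++ [r]) _ h65]
      rw [List.map_cons]
      have hv : ((PySem.Dict.mk (pvPairs 0 (rest.foldl PySem.Set.add (seen ++ [r])))).get? r).getD ""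
          = pvLetter seen.length := by
        rw [ht, pvGet_final (seen ++ [r]) t r (by simp), pvGet_fresh seen r 0 hr]
        simp
      rw [hv]
      simp

-- B's per-element closed form equals the value A's finished table assigns to c
theorem pvElem (coluna : List String) (c : String) (hc : c ∈ coluna) :
    ((PySem.Dict.mk (pvPairs 0 (PySem.List.dedup coluna))).get? c).getD ""
      = String.mk [Char.ofNat (65 +
          (PySem.Set.ofList (PySem.List.slice coluna none
            (some (((PySem.List.index? coluna c).getD 0 : Nat) : Int)))).length)] := by
  rcases Option.isSome_iff_exists.mp ((PySem.List.index?_isSome_iff coluna c).mpr hc) with ⟨k, hk⟩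
  rcases (PySem.List.index?_eq_some_iff coluna c k).mp hk with ⟨pre, suf, hsplit, hklen, hcpre⟩
  have hslice : PySem.List.slice coluna none (some ((k : Nat) : Int)) = pre := by
    rw [PySem.List.slice_to_natCast, hsplit, ← hklen, List.take_left]
  have hS : ¬ c ∈ PySem.Set.ofList pre := by
    rw [PySem.Set.mem_ofList]; exact hcpre
  -- dedup decomposes around the first occurrence of c
  have hded : ∃ t, PySem.List.dedup coluna = PySem.Set.ofList pre ++ c :: t := by
    rcases pvFoldAdd_prefix suf (PySem.Set.ofList pre ++ [c]) with ⟨t, ht⟩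
    refine ⟨t, ?_⟩
    rw [PySem.List.dedup_eq_ofList, PySem.Set.ofList_eq_foldl, hsplit,
      List.foldl_append, List.foldl_cons]
    rw [show (pre.foldl PySem.Set.add [] : List String) = PySem.Set.ofList pre from
      (PySem.Set.ofList_eq_foldl pre).symm]
    rw [PySem.Set.add_of_not_mem hS, ht]
    simp
  rcases hded with ⟨t, ht⟩
  have hget : (PySem.Dict.mk (pvPairs 0 (PySem.List.dedup coluna))).get? c
      = some (pvLetter (PySem.Set.ofList pre).length) := by
    rw [ht, show PySem.Set.ofList pre ++ c :: t
        = PySem.Set.ofList pre ++ (c :: t) from rfl, pvPairs_append]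
    rw [pvGet_skip_left _ _ _ (by rw [pvPairs_fst]; exact hS)]
    simp [pvPairs, PySem.Dict.get?_mk_cons]
  rw [hget, hk]
  simp [pvLetter, hslice]

-- ===== VERDICT (by name: the statement is the Claim_ definition above) =====
theorem codificar_coluna_spec : Claim_equal_codificar_coluna := by
  intro coluna _ hpre
  unfold Spec_codificar_coluna codificar_coluna codificar_coluna_alt
  dsimp only
  have hded : coluna.foldl PySem.Set.add [] = PySem.List.dedup coluna := by
    rw [PySem.List.dedup_eq_ofList, PySem.Set.ofList_eq_foldl]
  have hA : ('A' : Char) = Char.ofNat (65 + ([] : List String).length) := by decide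
  have hempty : (PySem.Dict.empty : PySem.Dict String String) = PySem.Dict.mk (pvPairs 0 []) := rfl
  rw [hA, hempty, pvInv coluna [] [] (by rw [hded]; exact hpre)]
  rw [hded]
  simp only [List.nil_append]
  congr 1
  exact List.map_congr_left (fun c hc => pvElem coluna c hc)
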